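-- pv_equiv track=rewrite | github.com/jaychia/amazen | web/app/irsystem/irhelpers/getpidhelper.py | valid_pid_set
-- ===== SOURCE A (Python) =====
-- from collections import defaultdict
--
-- def valid_pid_set(inverted_index_product, inverted_index_product_neg):
--     product_simscores = defaultdict(float)
--
--     all_terms_pid_set = set()
--     for i, (term, scorelist) in enumerate(inverted_index_product.items()):
--         if i == 0:
--             all_terms_pid_set = set([asin for (asin, _) in scorelist])
--         else:
--             all_terms_pid_set = all_terms_pid_set.intersection(set([asin for (asin, _) in scorelist]))
--
--     # remove product if it has negative description
--     for scorelist in inverted_index_product_neg.values():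
--         for (asin, _) in scorelist:
--             all_terms_pid_set.discard(asin)
--
--     return all_terms_pid_set
-- ===== SOURCE B (Python) =====
-- def valid_pid_set(inverted_index_product, inverted_index_product_neg):
--     nterms = len(inverted_index_product)
--     count = {}
--     for scorelist in inverted_index_product.values():
--         for asin in dict.fromkeys(asin for (asin, _) in scorelist):
--             count[asin] = count.get(asin, 0) + 1
--     negatives = set()
--     for scorelist in inverted_index_product_neg.values():
--         negatives.update(asin for (asin, _) in scorelist)
--     return {asin for asin, c in count.items() if c == nterms} - negatives
-- ===== Notes on version B (the rewrite author's own statement) =====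
-- stated objective: alternative
-- what changed: Replaces the repeated set-intersection pass (build a fresh set per term and intersect into an accumulator) by a single counting pass: one dict mapping each asin to the number of distinct terms containing it, keeping asins whose count equals the number of terms, then subtracting one set of all negative asins.
import Mathlib
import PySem

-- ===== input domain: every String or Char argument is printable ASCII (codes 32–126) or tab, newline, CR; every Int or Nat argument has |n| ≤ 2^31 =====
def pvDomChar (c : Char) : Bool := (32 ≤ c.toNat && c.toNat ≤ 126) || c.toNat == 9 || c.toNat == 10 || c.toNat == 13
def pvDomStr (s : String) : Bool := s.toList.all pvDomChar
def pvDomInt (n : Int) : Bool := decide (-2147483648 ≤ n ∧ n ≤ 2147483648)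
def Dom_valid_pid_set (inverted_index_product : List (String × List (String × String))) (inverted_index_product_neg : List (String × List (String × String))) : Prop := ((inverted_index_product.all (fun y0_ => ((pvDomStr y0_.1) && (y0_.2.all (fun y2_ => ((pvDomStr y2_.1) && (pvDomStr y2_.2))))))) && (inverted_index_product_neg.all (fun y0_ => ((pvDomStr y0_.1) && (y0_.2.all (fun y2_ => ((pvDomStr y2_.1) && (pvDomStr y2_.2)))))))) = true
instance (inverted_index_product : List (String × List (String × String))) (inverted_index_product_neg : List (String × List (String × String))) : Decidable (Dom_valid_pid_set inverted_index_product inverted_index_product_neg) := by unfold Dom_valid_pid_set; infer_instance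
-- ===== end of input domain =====

-- B replaces A's repeated set-intersection pass by a single counting pass (asin -> number of distinct terms containing it) plus one negative set; alternative decomposition, same cost.


-- ===== PORT A =====
-- for i, (term, scorelist) in enumerate(...): ported as a fold carrying (i, acc); sets are PySem.Set
def valid_pid_set (inverted_index_product : List (String × List (String × String))) (inverted_index_product_neg : List (String × List (String × String))) : List String :=
  let st := (PySem.Dict.ofList inverted_index_product).items.foldl
    (fun (st : Int × PySem.Set String) pr =>
      (st.1 + 1,
        if st.1 == 0 then PySem.Set.ofList (pr.2.map (fun p => p.1))
        else PySem.Set.inter st.2 (PySem.Set.ofList (pr.2.map (fun p => p.1)))))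
    (0, PySem.Set.empty)
  (PySem.Dict.ofList inverted_index_product_neg).values.foldl
    (fun acc sl => sl.foldl (fun acc p => PySem.Set.discard acc p.1) acc) st.2

-- ===== PORT B =====
def valid_pid_set_alt (inverted_index_product : List (String × List (String × String))) (inverted_index_product_neg : List (String × List (String × String))) : List String :=
  let dp := PySem.Dict.ofList inverted_index_product
  let nterms : Int := (dp.size : Int)
  let count : PySem.Dict String Int :=
    dp.values.foldl
      (fun d sl =>
        (PySem.List.dedup (sl.map (fun p => p.1))).foldl
          (fun d asin => d.insert asin (d.getD asin 0 + 1)) d)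
      PySem.Dict.empty
  let negatives : PySem.Set String :=
    (PySem.Dict.ofList inverted_index_product_neg).values.foldl
      (fun s sl => PySem.Set.update s (sl.map (fun p => p.1))) PySem.Set.empty
  PySem.Set.diff
    (PySem.Set.ofList ((count.items.filter (fun p => p.2 == nterms)).map (fun p => p.1)))
    negatives

-- ===== PRECONDITION & SPEC =====
def Spec_valid_pid_set (inverted_index_product : List (String × List (String × String))) (inverted_index_product_neg : List (String × List (String × String))) (out : List String) : Prop := out = valid_pid_set_alt inverted_index_product inverted_index_product_neg
instance (inverted_index_product : List (String × List (String × String))) (inverted_index_product_neg : List (String × List (String × String))) (out : List String) : Decidable (Spec_valid_pid_set inverted_index_product inverted_index_product_neg out) := by unfold Spec_valid_pid_set; infer_instance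

-- ===== CLAIM (what is proved, stated in full; the proofs are below) =====
def Claim_equal_valid_pid_set : Prop := ∀ (inverted_index_product : List (String × List (String × String))) (inverted_index_product_neg : List (String × List (String × String))), Dom_valid_pid_set inverted_index_product inverted_index_product_neg → Spec_valid_pid_set inverted_index_product inverted_index_product_neg (valid_pid_set inverted_index_product inverted_index_product_neg)

-- ===== LEMMAS AND PROOFS =====

theorem pv_interFold (L : List (String × List (String × String))) :
    ∀ (i : Int) (s : List String), 1 ≤ i →
    (L.foldl
      (fun (st : Int × PySem.Set String) pr =>
        (st.1 + 1,
          if st.1 == 0 then PySem.Set.ofList (pr.2.map (fun p => p.1))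
          else PySem.Set.inter st.2 (PySem.Set.ofList (pr.2.map (fun p => p.1)))))
      (i, s)).2
    = s.filter (fun x => L.all (fun pr => (PySem.Set.ofList (pr.2.map (fun p => p.1))).contains x)) := by
  induction L with
  | nil => intro i s hi; simp
  | cons h t ih =>
      intro i s hi
      have hne : (i == 0) = false := by simp; omega
      simp only [List.foldl_cons, hne]
      rw [if_neg (by simp)]
      rw [ih (i+1) _ (by omega)]
      simp [PySem.Set.inter, List.filter_filter, List.all_cons, Bool.and_comm]

theorem pv_discardInner (sl : List (String × String)) (acc : List String) :
    sl.foldl (fun acc p => PySem.Set.discard acc p.1) acc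
    = acc.filter (fun x => !((sl.map (fun p => p.1)).contains x)) := by
  induction sl generalizing acc with
  | nil => simp
  | cons h t ih =>
      simp only [List.foldl_cons]
      rw [ih]
      simp only [PySem.Set.discard, List.filter_filter]
      apply List.filter_congr
      intro x _
      simp [Bool.and_comm]

theorem pv_discardOuter (vs : List (List (String × String))) (s : List String) :
    vs.foldl (fun acc sl => sl.foldl (fun acc p => PySem.Set.discard acc p.1) acc) s
    = s.filter (fun x => !((vs.flatMap (fun sl => sl.map (fun p => p.1))).contains x)) := by
  induction vs generalizing s with
  | nil => simp
  | cons h t ih =>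
      simp only [List.foldl_cons]
      rw [ih, pv_discardInner, List.filter_filter]
      apply List.filter_congr
      intro x _
      by_cases h1 : x ∈ List.map (fun p => p.1) h <;>
        by_cases h2 : x ∈ List.flatMap (fun sl => List.map (fun p => p.1) sl) t <;>
        simp [h1, h2]

theorem pv_foldl_flatMap {α β γ : Type} (l : List α) (g : α → List β) (f : γ → β → γ) (init : γ) :
    l.foldl (fun d y => (g y).foldl f d) init = (l.flatMap g).foldl f init := by
  induction l generalizing init with
  | nil => simp
  | cons h t ih => simp [List.foldl_append, ih]

theorem pv_count_flatMap_dedup (rs : List (List (String × String))) (x : String) :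
    (rs.flatMap (fun sl => PySem.List.dedup (sl.map (fun p => p.1)))).count x
    = rs.countP (fun sl => (PySem.List.dedup (sl.map (fun p => p.1))).contains x) := by
  induction rs with
  | nil => simp
  | cons h t ih =>
      simp only [List.flatMap_cons, List.count_append, List.countP_cons, ih]
      by_cases hx : x ∈ PySem.List.dedup (h.map (fun p => p.1))
      · have hc : (PySem.List.dedup (h.map (fun p => p.1))).contains x = true := by
          simpa using hx
        rw [List.count_eq_one_of_mem (by simp [PySem.List.dedup_eq_ofList, PySem.Set.nodup_ofList]) hx, hc]
        simp [Nat.add_comm]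
      · have hc : (PySem.List.dedup (h.map (fun p => p.1))).contains x = false := by
          simpa using hx
        rw [List.count_eq_zero_of_not_mem hx, hc]
        simp

theorem pv_core (items : List (String × List (String × String))) :
    (items.foldl
      (fun (st : Int × PySem.Set String) pr =>
        (st.1 + 1,
          if st.1 == 0 then PySem.Set.ofList (pr.2.map (fun p => p.1))
          else PySem.Set.inter st.2 (PySem.Set.ofList (pr.2.map (fun p => p.1)))))
      (0, PySem.Set.empty)).2
    = PySem.Set.ofList
        (((PySem.Dict.counter
            ((items.map (fun x => x.2)).flatMap
              (fun sl => PySem.List.dedup (sl.map (fun p => p.1))))).items.filter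
          (fun p => p.2 == ((items.length : Int)))).map (fun p => p.1)) := by
  cases items with
  | nil => rfl
  | cons hd tl =>
      -- A side
      simp only [List.foldl_cons]
      have h0 : ((0:Int)+1, if ((0:Int) == 0) = true then PySem.Set.ofList (hd.2.map (fun p => p.1)) else PySem.Set.inter PySem.Set.empty (PySem.Set.ofList (hd.2.map (fun p => p.1)))) = (1, PySem.Set.ofList (hd.2.map (fun p => p.1))) := by norm_num
      rw [h0, pv_interFold tl 1 _ (by omega)]
      -- B side
      rw [PySem.Dict.items_counter, List.filter_map, List.map_map]
      simp only [Function.comp_def]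
      rw [List.map_id']
      rw [PySem.Set.ofList_eq_self_of_nodup _ (List.Nodup.filter _ (PySem.Set.nodup_ofList _))]
      simp only [List.map_cons, List.flatMap_cons, List.length_cons]
      rw [PySem.Set.ofList_append]
      rw [PySem.Set.ofList_eq_self_of_nodup _ (PySem.List.nodup_dedup _)]
      rw [PySem.Set.update_eq_append_filter, List.filter_append, List.filter_filter]
      -- the late block (new elements, absent from the first term) filters to nothing
      have hnil : List.filter
          (fun a => (↑(List.count a
                (PySem.List.dedup (List.map (fun p => p.1) hd.2) ++
                  List.flatMap (fun sl => PySem.List.dedup (List.map (fun p => p.1) sl))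
                    (List.map (fun x => x.2) tl))) : Int) == (↑(tl.length + 1) : Int)
              && !PySem.Set.contains (PySem.List.dedup (List.map (fun p => p.1) hd.2)) a)
          (PySem.Set.ofList
            (List.flatMap (fun sl => PySem.List.dedup (List.map (fun p => p.1) sl))
              (List.map (fun x => x.2) tl))) = [] := by
        rw [List.filter_eq_nil_iff]
        intro a _
        simp only [Bool.and_eq_true, beq_iff_eq, Bool.not_eq_true', PySem.Set.contains_eq_listContains,
          List.contains_eq_mem, decide_eq_false_iff_not, not_and, Nat.cast_inj]
        intro hcnt hmem
        rw [List.count_append, List.count_eq_zero_of_not_mem hmem,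
          pv_count_flatMap_dedup] at hcnt
        have hle : List.countP
            (fun sl => (PySem.List.dedup (List.map (fun p => p.1) sl)).contains a)
            (List.map (fun x => x.2) tl) ≤ tl.length := by
          simpa using List.countP_le_length (l := List.map (fun x => x.2) tl)
        omega
      rw [hnil, List.append_nil]
      rw [show PySem.List.dedup (List.map (fun p => p.1) hd.2)
            = PySem.Set.ofList (List.map (fun p => p.1) hd.2) from PySem.List.dedup_eq_ofList _]
      apply List.filter_congr
      intro x hx
      rw [Bool.eq_iff_iff, List.all_eq_true]
      rw [List.count_append, List.count_eq_one_of_mem (PySem.Set.nodup_ofList _) hx,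
        pv_count_flatMap_dedup, List.countP_map]
      simp only [beq_iff_eq, Nat.cast_inj, Function.comp_def]
      have hle := List.countP_le_length
        (p := fun sl => (PySem.List.dedup (List.map (fun p => p.1) sl)).contains x)
        (l := List.map (fun xx => xx.2) tl)
      rw [List.countP_map] at hle
      simp only [List.length_map] at hle ⊢
      simp only [Function.comp_def] at hle
      constructor
      · intro h
        have hc : List.countP
            (fun pr => (PySem.List.dedup (List.map (fun p => p.1) pr.2)).contains x) tl
            = tl.length := by
          apply List.countP_eq_length.mpr
          intro pr hpr
          have := h pr hpr
          simp only [PySem.Set.contains_eq_listContains, List.contains_eq_mem,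
            PySem.List.mem_dedup, PySem.Set.mem_ofList] at this ⊢
          exact this
        omega
      · intro h pr hpr
        have hc : List.countP
            (fun pr => (PySem.List.dedup (List.map (fun p => p.1) pr.2)).contains x) tl
            = tl.length := by omega
        have hall := List.countP_eq_length.mp hc pr hpr
        simp only [PySem.Set.contains_eq_listContains, List.contains_eq_mem,
          PySem.List.mem_dedup, PySem.Set.mem_ofList] at hall ⊢
        exact hall

theorem pv_main (ip inn : List (String × List (String × String))) :
    valid_pid_set ip inn = valid_pid_set_alt ip inn := by
  simp only [valid_pid_set, valid_pid_set_alt, PySem.Dict.values, PySem.Dict.size]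
  rw [pv_discardOuter]
  rw [pv_foldl_flatMap (f := fun (d : PySem.Dict String Int) asin => d.insert asin (d.getD asin 0 + 1))]
  rw [PySem.Dict.foldl_insert_getD_add_one_eq_counter]
  rw [pv_core]
  simp only [PySem.Set.update]
  rw [pv_foldl_flatMap (f := PySem.Set.add)]
  have he : (PySem.Set.empty : PySem.Set String) = [] := rfl
  rw [he, ← PySem.Set.ofList_eq_foldl]
  simp only [PySem.Set.diff]
  apply List.filter_congr
  intro x _
  simp [PySem.Set.mem_ofList]

-- ===== VERDICT (by name: the statement is the Claim_ definition above) =====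
theorem valid_pid_set_spec : Claim_equal_valid_pid_set := by
  intro ip inn _
  unfold Spec_valid_pid_set
  exact pv_main ip inn
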